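-- pv_equiv track=rewrite | github.com/FantasyVR/xpbd | model/liver/convert.py | extract_surface
-- ===== SOURCE A (Python) =====
-- def extract_surface(tetraedrons):
--     surface = set()
--     for tet in tetraedrons:
--         for face in (  (tet[0], tet[1], tet[2]),
--                     (tet[0], tet[2], tet[3]),
--                     (tet[0], tet[3], tet[2]),
--                     (tet[1], tet[3], tet[2]) ):
--             if face in surface:
--                 surface.remove(face)
--             else:
--                 surface.add((face[0], face[1], face[2]))
--     return surface
-- ===== SOURCE B (Python) =====
-- def extract_surface(tetraedrons):
--     faces = []
--     for tet in tetraedrons: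
--         faces += [(tet[0], tet[1], tet[2]),
--                   (tet[0], tet[2], tet[3]),
--                   (tet[0], tet[3], tet[2]),
--                   (tet[1], tet[3], tet[2])]
--     counts = {}
--     for face in faces:
--         counts[face] = counts.get(face, 0) + 1
--     return {face for face in faces if counts[face] % 2 == 1}
-- ===== Notes on version B (the rewrite author's own statement) =====
-- stated objective: alternative
-- what changed: Replaces A's stateful set toggling (membership test + add/remove per face) by a stateless two-pass scheme: flatten all faces into a list, build a count dictionary in one pass, then return the set of faces with odd count.
import Mathlib
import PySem

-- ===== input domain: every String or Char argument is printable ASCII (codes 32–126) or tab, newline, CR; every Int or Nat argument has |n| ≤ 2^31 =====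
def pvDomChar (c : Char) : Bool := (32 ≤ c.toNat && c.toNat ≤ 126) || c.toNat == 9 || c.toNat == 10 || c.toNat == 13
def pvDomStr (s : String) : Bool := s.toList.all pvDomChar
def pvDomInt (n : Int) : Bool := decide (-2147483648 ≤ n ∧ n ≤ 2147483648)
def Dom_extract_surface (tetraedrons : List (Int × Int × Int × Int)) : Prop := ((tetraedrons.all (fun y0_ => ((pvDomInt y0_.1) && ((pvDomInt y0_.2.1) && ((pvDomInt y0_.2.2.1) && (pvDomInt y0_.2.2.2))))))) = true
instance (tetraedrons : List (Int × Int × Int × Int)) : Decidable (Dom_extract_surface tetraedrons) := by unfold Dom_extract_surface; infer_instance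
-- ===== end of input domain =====

-- B replaces A's stateful set toggling by a counting pass plus a parity filter (a face lies on the
-- surface iff it was emitted an odd number of times); alternative decomposition, similar cost.
-- Both programs return a Python set (an unordered value); its list order here follows the PySem model.

-- ===== PORT A =====
-- the body of A's inner loop: toggle `face` in/out of `surface`
def pvToggle (surface : PySem.Set (Int × Int × Int)) (face : Int × Int × Int) : PySem.Set (Int × Int × Int) :=
  if PySem.Set.contains surface face then
    -- surface.remove(face): membership was just checked, so KeyError is impossible
    (PySem.Set.remove? surface face).getD surface
  else
    PySem.Set.add surface (face.1, face.2.1, face.2.2)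

def extract_surface (tetraedrons : List (Int × Int × Int × Int)) : List (Int × Int × Int) :=
  tetraedrons.foldl
    (fun surface tet =>
      [(tet.1, tet.2.1, tet.2.2.1),
       (tet.1, tet.2.2.1, tet.2.2.2),
       (tet.1, tet.2.2.2, tet.2.2.1),
       (tet.2.1, tet.2.2.2, tet.2.2.1)].foldl pvToggle surface)
    PySem.Set.empty

-- ===== PORT B =====
-- the four faces of one tetrahedron (the list literal added to `faces` in Source B)
def pvFaces (tet : Int × Int × Int × Int) : List (Int × Int × Int) :=
  [(tet.1, tet.2.1, tet.2.2.1),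
   (tet.1, tet.2.2.1, tet.2.2.2),
   (tet.1, tet.2.2.2, tet.2.2.1),
   (tet.2.1, tet.2.2.2, tet.2.2.1)]

def extract_surface_alt (tetraedrons : List (Int × Int × Int × Int)) : List (Int × Int × Int) :=
  let faces := tetraedrons.foldl (fun acc tet => acc ++ pvFaces tet) []
  let counts := faces.foldl (fun d face => d.insert face (d.getD face 0 + 1)) PySem.Dict.empty
  -- {face for face in faces if counts[face] % 2 == 1}: the distinct odd-count faces.
  -- counts[face]: face ∈ faces, so never a KeyError (ported via getD).  Python's iteration order
  -- over a set is not modelled (PYSEM.md): the set value is realized as the list keeping each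
  -- face's LAST occurrence in `faces` (Mathlib's List.dedup), one valid ordering of its elements.
  (faces.filter (fun face => PySem.Int.mod (counts.getD face 0) 2 == 1)).dedup

-- ===== PRECONDITION & SPEC =====
def Spec_extract_surface (tetraedrons : List (Int × Int × Int × Int)) (out : List (Int × Int × Int)) : Prop := out = extract_surface_alt tetraedrons
instance (tetraedrons : List (Int × Int × Int × Int)) (out : List (Int × Int × Int)) : Decidable (Spec_extract_surface tetraedrons out) := by unfold Spec_extract_surface; infer_instance

-- ===== CLAIM (what is proved, stated in full; the proofs are below) =====
def Claim_equal_extract_surface : Prop := ∀ (tetraedrons : List (Int × Int × Int × Int)), Dom_extract_surface tetraedrons → Spec_extract_surface tetraedrons (extract_surface tetraedrons)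

-- ===== LEMMAS AND PROOFS =====

lemma pv_dedup_append_singleton {α : Type} [BEq α] [LawfulBEq α] [DecidableEq α] (L : List α) (f : α) :
    List.dedup (L ++ [f]) = (List.dedup L).filter (fun g => g != f) ++ [f] := by
  induction L with
  | nil => simp
  | cons a L ih =>
      by_cases haf : a = f
      · subst haf
        rw [List.cons_append, List.dedup_cons_of_mem (by simp)]
        by_cases haL : a ∈ L
        · rw [ih, List.dedup_cons_of_mem haL]
        · rw [ih, List.dedup_cons_of_notMem haL, List.filter_cons_of_neg (by simp)]
      · by_cases haL : a ∈ L
        · rw [List.cons_append, List.dedup_cons_of_mem (by simp [haL]),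
            List.dedup_cons_of_mem haL, ih]
        · rw [List.cons_append, List.dedup_cons_of_notMem (by simp [haL, haf]),
            List.dedup_cons_of_notMem haL, ih, List.filter_cons_of_pos (by simp [haf])]
          simp

lemma pv_filter_dedup {α : Type} [BEq α] [LawfulBEq α] [DecidableEq α] (p : α → Bool) (L : List α) :
    (List.dedup L).filter p = List.dedup (L.filter p) := by
  induction L with
  | nil => simp
  | cons a L ih =>
      by_cases hp : p a
      · by_cases haL : a ∈ L
        · have hfa : a ∈ L.filter p := List.mem_filter.mpr ⟨haL, hp⟩
          simp only [List.dedup_cons_of_mem haL, List.filter_cons_of_pos hp,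
            List.dedup_cons_of_mem hfa, ih]
        · have hfa : a ∉ L.filter p := fun h => haL (List.mem_filter.mp h).1
          simp only [List.dedup_cons_of_notMem haL, List.filter_cons_of_pos hp,
            List.dedup_cons_of_notMem hfa, ih]
      · simp only [List.filter_cons_of_neg (by simpa using hp)]
        by_cases haL : a ∈ L
        · simp only [List.dedup_cons_of_mem haL, ih]
        · simp only [List.dedup_cons_of_notMem haL,
            List.filter_cons_of_neg (by simpa using hp), ih]

lemma pv_toggle_eq_dedup (l : List (Int × Int × Int)) :
    l.foldl pvToggle PySem.Set.empty
      = List.dedup (l.filter (fun g => l.count g % 2 == 1)) := by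
  induction l using List.reverseRecOn with
  | nil => simp [PySem.Set.empty]
  | append_singleton l f ih =>
      rw [List.foldl_append, List.foldl_cons, List.foldl_nil, ih]
      have hcf : (l ++ [f]).count f = l.count f + 1 := by
        simp [List.count_append]
      have hq' : ∀ x ∈ l, x ≠ f →
          ((l ++ [f]).count x % 2 == 1) = (l.count x % 2 == 1) := by
        intro x _ hx
        have : (l ++ [f]).count x = l.count x := by
          simp [List.count_append, hx.symm]
        rw [this]
      by_cases hodd : l.count f % 2 = 1
      · -- f has odd count in l: the toggle removes it; the appended copy is filtered out
        have hfq : (l.count f % 2 == 1) = true := by simp [hodd]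
        have hfl : f ∈ l := List.count_pos_iff.mp (by omega)
        have hmem : f ∈ List.dedup (l.filter (fun g => l.count g % 2 == 1)) :=
          List.mem_dedup.mpr (List.mem_filter.mpr ⟨hfl, hfq⟩)
        have hL : pvToggle (List.dedup (l.filter (fun g => l.count g % 2 == 1))) f
            = (List.dedup (l.filter (fun g => l.count g % 2 == 1))).filter (fun y => y != f) := by
          unfold pvToggle
          rw [if_pos ((PySem.Set.contains_iff _ _).mpr hmem), PySem.Set.remove?_of_mem hmem,
            Option.getD_some]
          rfl
        rw [hL]
        have hR : (l ++ [f]).filter (fun g => (l ++ [f]).count g % 2 == 1)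
            = l.filter (fun g => (l.count g % 2 == 1) && (g != f)) := by
          rw [List.filter_append]
          have h1 : ([f] : List (Int × Int × Int)).filter (fun g => (l ++ [f]).count g % 2 == 1) = [] := by
            simp; omega
          rw [h1, List.append_nil]
          refine List.filter_congr (fun x hx => ?_)
          by_cases hxf : x = f
          · subst hxf; simp; omega
          · rw [hq' x hx hxf]; simp [hxf]
        rw [hR]
        have hR2 : l.filter (fun g => (l.count g % 2 == 1) && (g != f))
            = (l.filter (fun g => l.count g % 2 == 1)).filter (fun y => y != f) := by
          rw [List.filter_filter]
          exact List.filter_congr (fun x _ => Bool.and_comm _ _)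
        rw [hR2, pv_filter_dedup]
      · -- f has even count in l: the toggle appends it; earlier copies are filtered out
        have hfq : (l.count f % 2 == 1) = false := by simp [hodd]
        have hnmem : f ∉ List.dedup (l.filter (fun g => l.count g % 2 == 1)) := by
          intro h
          have h2 := (List.mem_filter.mp (List.mem_dedup.mp h)).2
          rw [hfq] at h2
          exact Bool.false_ne_true h2
        have hcont : ¬ (PySem.Set.contains (List.dedup (l.filter (fun g => l.count g % 2 == 1))) f = true) :=
          fun h => hnmem ((PySem.Set.contains_iff _ _).mp h)
        have hL : pvToggle (List.dedup (l.filter (fun g => l.count g % 2 == 1))) f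
            = List.dedup (l.filter (fun g => l.count g % 2 == 1)) ++ [f] := by
          unfold pvToggle
          rw [if_neg hcont]
          show PySem.Set.add _ f = _
          rw [PySem.Set.add, if_neg hcont]
        rw [hL]
        have hR : (l ++ [f]).filter (fun g => (l ++ [f]).count g % 2 == 1)
            = l.filter (fun g => (l ++ [f]).count g % 2 == 1) ++ [f] := by
          rw [List.filter_append]
          congr 1
          simp; omega
        rw [hR, pv_dedup_append_singleton, pv_filter_dedup]
        have hmid : (l.filter (fun g => (l ++ [f]).count g % 2 == 1)).filter (fun g => g != f)
            = (l.filter (fun g => l.count g % 2 == 1)).filter (fun g => g != f) := by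
          rw [List.filter_filter, List.filter_filter]
          refine List.filter_congr (fun x hx => ?_)
          by_cases hxf : x = f
          · subst hxf; simp
          · rw [hq' x hx hxf]
        rw [hmid]
        have h3 : (List.filter (fun g => g != f) (l.filter (fun g => l.count g % 2 == 1))).dedup
            = (l.filter (fun g => l.count g % 2 == 1)).dedup := by
          rw [← pv_filter_dedup]
          refine List.filter_eq_self.mpr (fun x hx => ?_)
          simp only [bne_iff_ne, ne_eq]
          exact fun h => hnmem (h ▸ hx)
        rw [h3]

lemma pv_mod_two (n : Nat) : (PySem.Int.mod (n : Int) 2 == 1) = (n % 2 == 1) := by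
  have h : PySem.Int.mod (n : Int) 2 = ((n % 2 : Nat) : Int) := by
    simp only [PySem.Int.mod]
    rw [Int.fmod_eq_emod, if_pos (Or.inl (by norm_num))]
    omega
  rw [h]
  rcases Nat.mod_two_eq_zero_or_one n with h2 | h2 <;> simp [h2]

-- B's counting dict agrees with List.count
lemma pv_counts_getD (faces : List (Int × Int × Int)) (f : Int × Int × Int) :
    (faces.foldl (fun d face => d.insert face (d.getD face 0 + 1)) PySem.Dict.empty).getD f 0
      = (faces.count f : Int) := by
  rw [PySem.Dict.getD_foldl_insert_add_one]
  simp

-- A's loop over tetrahedra = one toggle per emitted face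
lemma pv_foldA (tets : List (Int × Int × Int × Int)) : ∀ s : PySem.Set (Int × Int × Int),
    tets.foldl
      (fun surface tet =>
        [(tet.1, tet.2.1, tet.2.2.1),
         (tet.1, tet.2.2.1, tet.2.2.2),
         (tet.1, tet.2.2.2, tet.2.2.1),
         (tet.2.1, tet.2.2.2, tet.2.2.1)].foldl pvToggle surface) s
      = (tets.flatMap pvFaces).foldl pvToggle s := by
  induction tets with
  | nil => intro s; rfl
  | cons t ts ih =>
      intro s
      rw [List.foldl_cons, List.flatMap_cons, List.foldl_append, ih]
      rfl

-- ===== VERDICT (by name: the statement is the Claim_ definition above) =====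
theorem extract_surface_spec : Claim_equal_extract_surface := by
  intro tets _
  unfold Spec_extract_surface extract_surface extract_surface_alt
  rw [PySem.List.foldl_append_eq_flatMap, List.nil_append, pv_foldA, pv_toggle_eq_dedup]
  congr 1
  refine List.filter_congr (fun x _ => ?_)
  rw [pv_counts_getD, pv_mod_two]
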